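-- pv_equiv track=rewrite | github.com/zyf0717/esolang-interpreters | interpreters/utils.py | get_dict
-- ===== SOURCE A (Python) =====
-- def get_dict(code):
--     D = dict()
--     for i in range(len(code)):
--         if code[i] == "[":
--             D[str(i)] = None
--         elif code[i] == "]":
--             D[[(k) for k, v in D.items() if v is None][-1]] = i
--     return D
-- ===== SOURCE B (Python) =====
-- def get_dict(code):
--     # For each "[" independently, find its matching "]" by a forward depth-counting
--     # scan; unmatched "[" maps to None.  No shared stack/state between brackets.
--     def close_of(i):
--         depth = 1
--         for j, c in enumerate(code[i + 1:], i + 1):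
--             if c == "[":
--                 depth += 1
--             elif c == "]":
--                 depth -= 1
--                 if depth == 0:
--                     return j
--         return None
--
--     return {str(i): close_of(i) for i, c in enumerate(code) if c == "["}
-- ===== Notes on version B (the rewrite author's own statement) =====
-- stated objective: alternative
-- what changed: Replaced A's single stateful pass (dict rescanned for the last still-open '[' at every ']') by a stateless per-bracket algorithm: each '[' independently finds its matching ']' with a forward depth-counting scan, and the dict is assembled by one comprehension; no shared stack/dict state links the brackets.
import Mathlib
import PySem

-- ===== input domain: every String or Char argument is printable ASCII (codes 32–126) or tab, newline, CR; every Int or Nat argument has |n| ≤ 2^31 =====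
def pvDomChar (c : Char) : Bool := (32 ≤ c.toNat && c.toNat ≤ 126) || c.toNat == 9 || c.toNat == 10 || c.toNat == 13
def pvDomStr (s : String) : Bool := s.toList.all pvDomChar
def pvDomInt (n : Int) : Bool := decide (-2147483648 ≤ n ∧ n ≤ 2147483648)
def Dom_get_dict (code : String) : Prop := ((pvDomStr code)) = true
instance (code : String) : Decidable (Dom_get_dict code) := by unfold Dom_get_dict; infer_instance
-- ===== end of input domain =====

-- B replaces A's single stateful pass (dict rescanned for the last still-open '[' at each ']')
-- by a stateless per-bracket algorithm: every '[' independently finds its matching ']' with a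
-- forward depth-counting scan; objective = alternative (same asymptotic cost, no shared state).

-- ===== PORT A =====
-- loop body of A: code[i] is passed in as c
def getDictStep (D : PySem.Dict String (Option Int)) (i : Int) (c : Char) :
    PySem.Dict String (Option Int) :=
  if c = '[' then D.insert (PySem.Int.toStr i) none
  else if c = ']' then
    match PySem.List.pyGet? ((D.items.filter (fun kv => kv.2.isNone)).map (fun kv => kv.1)) (-1) with
    | some k => D.insert k (some i)
    | none => D        -- Python raises IndexError here; excluded by Pre_
  else D

def get_dict (code : String) : List (String × Option Int) :=
  ((PySem.List.pyRange 0 (PySem.Str.len code) 1).foldl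
    (fun D i =>
      match PySem.Str.pyGet? code i with
      | some c => getDictStep D i c
      | none => D)     -- unreachable: i ranges over valid indices of code
    PySem.Dict.empty).items

-- ===== PORT B =====
-- close_of's loop: for j, c in enumerate(code[i+1:], i+1), with the running depth;
-- early 'return j' becomes the 'some p.1' branch
def closeScan : List (Int × Char) → Int → Option Int
  | [], _ => none
  | p :: rest, depth =>
    if p.2 = '[' then closeScan rest (depth + 1)
    else if p.2 = ']' then
      if depth - 1 = 0 then some p.1 else closeScan rest (depth - 1)
    else closeScan rest depth

def closeOf (cs : List Char) (i : Int) : Option Int :=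
  closeScan (PySem.List.enumerate (PySem.List.slice cs (some (i + 1)) none) (i + 1)) 1

def get_dict_alt (code : String) : List (String × Option Int) :=
  (PySem.List.enumerate code.toList 0).filterMap
    (fun p => if p.2 = '[' then some (PySem.Int.toStr p.1, closeOf code.toList p.1) else none)

-- ===== PRECONDITION & SPEC =====
-- Pre_ excludes exactly the inputs where some ']' has no open '[' before it: there A raises
-- IndexError (the empty comprehension indexed with [-1]).
def Pre_get_dict (code : String) : Prop :=
  ∀ n : Nat, n ≤ code.toList.length →
    (code.toList.take n).count ']' ≤ (code.toList.take n).count '['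
instance (code : String) : Decidable (Pre_get_dict code) := by unfold Pre_get_dict; infer_instance
def pvWitness_get_dict : String := "[a[b]]c["
def Spec_get_dict (code : String) (out : List (String × Option Int)) : Prop := out = get_dict_alt code
instance (code : String) (out : List (String × Option Int)) : Decidable (Spec_get_dict code out) := by unfold Spec_get_dict; infer_instance

-- ===== CLAIM (what is proved, stated in full; the proofs are below) =====
def Claim_equal_get_dict : Prop := ∀ (code : String), Dom_get_dict code → Pre_get_dict code → Spec_get_dict code (get_dict code)

-- ===== LEMMAS AND PROOFS =====

-- proof-side intermediate: the classic stack run (push index on '[', pop on ']'),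
-- state = (opens, stack, match); A's dict is tied to it by GDInv, B's scans by scanInv
def stackStep (s : List Int × List Int × PySem.Dict Int Int) (p : Int × Char) :
    List Int × List Int × PySem.Dict Int Int :=
  if p.2 = '[' then (s.1 ++ [p.1], p.1 :: s.2.1, s.2.2)
  else if p.2 = ']' then
    match s.2.1 with
    | [] => s
    | t :: rest => (s.1, rest, s.2.2.insert t p.1)
  else s

-- str(i) is injective on the nonnegative indices A uses as keys
lemma digitChar_inj (m n : Nat) (hm : m < 10) (hn : n < 10)
    (h : Nat.digitChar m = Nat.digitChar n) : m = n := by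
  interval_cases m <;> interval_cases n <;> simp_all [Nat.digitChar]

lemma map_digitChar_inj : ∀ (l1 l2 : List Nat), (∀ x ∈ l1, x < 10) → (∀ x ∈ l2, x < 10) →
    l1.map Nat.digitChar = l2.map Nat.digitChar → l1 = l2 := by
  intro l1
  induction l1 with
  | nil => intro l2 _ _ h; cases l2 <;> simp_all
  | cons a t ih =>
    intro l2 h1 h2 h
    cases l2 with
    | nil => simp_all
    | cons b t2 =>
      simp only [List.map_cons, List.cons.injEq] at h
      have := digitChar_inj a b (h1 a (by simp)) (h2 b (by simp)) h.1
      have := ih t2 (fun x hx => h1 x (by simp [hx])) (fun x hx => h2 x (by simp [hx])) h.2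
      simp_all

lemma toDigitsCore_rep : ∀ (f n : Nat) (ds : List Char), n < f →
    Nat.toDigitsCore 10 f n ds =
      (if n = 0 then ['0'] else ((Nat.digits 10 n).map Nat.digitChar).reverse) ++ ds := by
  intro f
  induction f with
  | zero => omega
  | succ f ih =>
    intro n ds hn
    by_cases h0 : n / 10 = 0
    · have hlt : n < 10 := by omega
      simp only [Nat.toDigitsCore, h0, if_true]
      by_cases hz : n = 0
      · subst hz; simp [Nat.digitChar]
      · have : Nat.digits 10 n = [n] := by
          rw [Nat.digits_def' (by norm_num) (Nat.pos_of_ne_zero hz), h0]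
          simp [Nat.mod_eq_of_lt hlt]
        simp [hz, this, Nat.mod_eq_of_lt hlt]
    · have hpos : 0 < n := Nat.pos_of_ne_zero (fun h => h0 (by simp [h]))
      have hrec : n / 10 < f := by
        have := Nat.div_lt_self hpos (by norm_num : (1:Nat) < 10)
        omega
      simp only [Nat.toDigitsCore, h0, if_false]
      rw [ih (n / 10) (Nat.digitChar (n % 10) :: ds) hrec]
      have hne : n ≠ 0 := by omega
      rw [Nat.digits_def' (by norm_num : (1:Nat) < 10) hpos]
      simp [hne, h0]

lemma toDigits_inj (a b : Nat) (h : Nat.toDigits 10 a = Nat.toDigits 10 b) : a = b := by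
  unfold Nat.toDigits at h
  rw [toDigitsCore_rep (a + 1) a [] (by omega), toDigitsCore_rep (b + 1) b [] (by omega)] at h
  simp only [List.append_nil] at h
  by_cases ha : a = 0 <;> by_cases hb : b = 0
  · omega
  · exfalso
    simp only [ha, if_true, hb, if_false] at h
    have : Nat.digits 10 b = [0] := by
      have := map_digitChar_inj [0] (Nat.digits 10 b) (by simp)
        (fun x hx => Nat.digits_lt_base (by norm_num) hx)
        (by simpa [Nat.digitChar] using congrArg List.reverse h)
      exact this.symm
    have h2 := Nat.ofDigits_digits 10 b
    rw [this] at h2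
    exact hb (by simpa using h2.symm)
  · exfalso
    simp only [ha, if_false, hb, if_true] at h
    have : Nat.digits 10 a = [0] := by
      have := map_digitChar_inj [0] (Nat.digits 10 a) (by simp)
        (fun x hx => Nat.digits_lt_base (by norm_num) hx)
        (by simpa [Nat.digitChar] using (congrArg List.reverse h).symm)
      exact this.symm
    have h2 := Nat.ofDigits_digits 10 a
    rw [this] at h2
    exact ha (by simpa using h2.symm)
  · simp only [ha, hb, if_false] at h
    have := map_digitChar_inj (Nat.digits 10 a) (Nat.digits 10 b)
      (fun x hx => Nat.digits_lt_base (by norm_num) hx)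
      (fun x hx => Nat.digits_lt_base (by norm_num) hx)
      (by simpa using congrArg List.reverse h)
    calc a = Nat.ofDigits 10 (Nat.digits 10 a) := (Nat.ofDigits_digits 10 a).symm
    _ = Nat.ofDigits 10 (Nat.digits 10 b) := by rw [this]
    _ = b := Nat.ofDigits_digits 10 b

lemma toStr_inj_nonneg (a b : Int) (ha : 0 ≤ a) (hb : 0 ≤ b)
    (h : PySem.Int.toStr a = PySem.Int.toStr b) : a = b := by
  have h' : PySem.Int.toChars a = PySem.Int.toChars b := by
    have := congrArg String.toList h
    simpa [PySem.Int.toStr, String.toList_ofList] using this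
  simp only [PySem.Int.toChars, if_neg (by omega : ¬ a < 0), if_neg (by omega : ¬ b < 0)] at h'
  have := toDigits_inj a.toNat b.toNat h'
  omega

-- the invariant tying A's dict to the stack run's (opens, stack, match) after `b` characters
def GDInv (D : PySem.Dict String (Option Int)) (opens stack : List Int)
    (m : PySem.Dict Int Int) (b : Int) : Prop :=
  D.items = opens.map (fun j => (PySem.Int.toStr j, m.get? j))
  ∧ stack.reverse = opens.filter (fun j => (m.get? j).isNone)
  ∧ opens.Pairwise (· < ·)
  ∧ (∀ j ∈ opens, 0 ≤ j ∧ j < b)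
  ∧ (∀ k v, m.get? k = some v → k ∈ opens)

-- balance of the remaining suffix relative to the current stack depth
def GDBal (d : Nat) (cs : List Char) : Prop :=
  ∀ n : Nat, (cs.take n).count ']' ≤ d + (cs.take n).count '['

lemma rangeA (cs : List Char) : ∀ (k s : Nat) (D : PySem.Dict String (Option Int)),
    s + k = cs.length →
    (PySem.List.pyRange (s : Int) (cs.length : Int) 1).foldl
      (fun D i => match PySem.List.pyGet? cs i with
        | some c => getDictStep D i c
        | none => D) D
    = (PySem.List.enumerate (cs.drop s) (s : Int)).foldl
        (fun D p => getDictStep D p.1 p.2) D := by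
  intro k
  induction k with
  | zero =>
    intro s D h
    rw [PySem.List.pyRange_one_eq_nil (by omega)]
    rw [List.drop_of_length_le (by omega)]
    simp [PySem.List.enumerate]
  | succ k ih =>
    intro s D h
    have hs : s < cs.length := by omega
    rw [PySem.List.pyRange_one_cons (by exact_mod_cast hs)]
    rw [List.drop_eq_getElem_cons hs, PySem.List.enumerate_cons]
    simp only [List.foldl_cons, PySem.List.pyGet?_natCast]
    rw [List.getElem?_eq_getElem hs]
    have : ((s : Int) + 1) = ((s + 1 : Nat) : Int) := by push_cast; ring
    rw [this, ih (s + 1) _ (by omega)]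

lemma mainInv : ∀ (cs : List Char) (s : Nat) D opens stack m,
    GDInv D opens stack m (s : Int) →
    GDBal stack.length cs →
    ((PySem.List.enumerate cs (s : Int)).foldl (fun D p => getDictStep D p.1 p.2) D).items
      = (let r := (PySem.List.enumerate cs (s : Int)).foldl stackStep (opens, stack, m)
         r.1.map (fun j => (PySem.Int.toStr j, r.2.2.get? j))) := by
  intro cs
  induction cs with
  | nil =>
    intro s D opens stack m hInv _
    simpa [PySem.List.enumerate] using hInv.1
  | cons c cs ih =>
    intro s D opens stack m hInv hBal
    obtain ⟨h1, h2, h3, h4, h5⟩ := hInv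
    have hnodup : opens.Nodup := h3.imp (fun h => ne_of_lt h)
    have hcast : ((s : Int) + 1) = ((s + 1 : Nat) : Int) := by push_cast; ring
    rw [PySem.List.enumerate_cons]
    simp only [List.foldl_cons]
    by_cases hc1 : c = '['
    · -- push
      subst hc1
      have hfresh : ¬ ((PySem.Int.toStr (s : Int)) ∈ D.keys) := by
        simp only [PySem.Dict.keys, h1, List.map_map]
        intro hmem
        obtain ⟨j, hj, hje⟩ := List.mem_map.mp hmem
        have h0j : (0:Int) ≤ j := (h4 j hj).1
        have := toStr_inj_nonneg j (s : Int) h0j (by positivity) hje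
        have := (h4 j hj).2
        omega
      have hcont : D.contains (PySem.Int.toStr (s : Int)) = false := by
        rcases Bool.eq_false_or_eq_true (D.contains (PySem.Int.toStr (s : Int))) with h | h
        · exact absurd ((PySem.Dict.contains_iff_mem_keys D _).mp h) hfresh
        · exact h
      have hms : m.get? (s : Int) = none := by
        cases hmv : m.get? (s : Int) with
        | none => rfl
        | some v =>
          have := h5 _ _ hmv
          have := (h4 _ this).2
          omega
      have hstepA : getDictStep D (s : Int) '[' = D.insert (PySem.Int.toStr (s : Int)) none := by
        simp [getDictStep]
      have hstepB : stackStep (opens, stack, m) ((s : Int), '[') =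
          (opens ++ [(s : Int)], (s : Int) :: stack, m) := by
        simp [stackStep]
      rw [hstepA, hstepB, hcast]
      apply ih
      · refine ⟨?_, ?_, ?_, ?_, ?_⟩
        · rw [PySem.Dict.items_insert_of_not_contains D _ hcont, h1, List.map_append]
          simp [hms]
        · simp only [List.reverse_cons, List.filter_append, h2]
          simp [hms]
        · refine List.pairwise_append.mpr ⟨h3, by simp, ?_⟩
          intro j hj j' hj'
          simp only [List.mem_singleton] at hj'
          subst hj'
          exact (h4 j hj).2
        · intro j hj
          rcases List.mem_append.mp hj with h | h
          · have := h4 j h; push_cast; omega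
          · simp only [List.mem_singleton] at h; subst h; push_cast; omega
        · intro k v hk
          exact List.mem_append_left _ (h5 k v hk)
      · intro n
        have := hBal (n + 1)
        simp [List.take_succ_cons] at this
        simp only [List.length_cons]
        omega
    · by_cases hc2 : c = ']'
      · -- pop
        subst hc2
        have hne : stack ≠ [] := by
          intro hnil
          have := hBal 1
          simp [hnil] at this
        obtain ⟨t, rest, rfl⟩ : ∃ t rest, stack = t :: rest := by
          cases stack with
          | nil => exact absurd rfl hne
          | cons t rest => exact ⟨t, rest, rfl⟩
        have ht_mem : t ∈ opens := by
          have : t ∈ (t :: rest).reverse := by simp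
          rw [h2] at this
          exact (List.mem_filter.mp this).1
        have h0t : (0:Int) ≤ t := (h4 t ht_mem).1
        -- A's comprehension is the stack (as strings), last element = toStr t
        have hflt : (D.items.filter (fun kv => kv.2.isNone)).map (fun kv => kv.1)
            = rest.reverse.map PySem.Int.toStr ++ [PySem.Int.toStr t] := by
          rw [h1, List.filter_map]
          have : ((fun kv : String × Option Int => kv.2.isNone) ∘
              (fun j => (PySem.Int.toStr j, m.get? j))) = fun j => (m.get? j).isNone := rfl
          rw [this, ← h2]
          simp [List.map_map, Function.comp_def]
        have hstepA : getDictStep D (s : Int) ']'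
            = D.insert (PySem.Int.toStr t) (some (s : Int)) := by
          simp [getDictStep, hflt, PySem.List.pyGet?_neg_one_append_singleton]
        have hstepB : stackStep (opens, t :: rest, m) ((s : Int), ']') =
            (opens, rest, m.insert t (s : Int)) := by
          simp [stackStep]
        have hcont : D.contains (PySem.Int.toStr t) = true := by
          apply (PySem.Dict.contains_iff_mem_keys D _).mpr
          simp only [PySem.Dict.keys, h1, List.map_map]
          exact List.mem_map.mpr ⟨t, ht_mem, rfl⟩
        have hstack_nodup : (t :: rest).Nodup := by
          apply List.nodup_reverse.mp
          rw [h2]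
          exact hnodup.filter _
        have ht_rest : t ∉ rest := by
          simp only [List.nodup_cons] at hstack_nodup
          exact hstack_nodup.1
        have hitems : (D.insert (PySem.Int.toStr t) (some (s : Int))).items
            = opens.map (fun j => (PySem.Int.toStr j, (m.insert t (s : Int)).get? j)) := by
          rw [PySem.Dict.items_insert_of_contains D _ hcont, h1, List.map_map]
          apply List.map_congr_left
          intro j hj
          simp only [Function.comp_def]
          by_cases hjt : j = t
          · subst hjt
            simp [PySem.Dict.get?_insert_self]
          · have : PySem.Int.toStr j ≠ PySem.Int.toStr t := by
              intro he
              exact hjt (toStr_inj_nonneg j t (h4 j hj).1 h0t he)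
            simp only [beq_iff_eq, if_neg this]
            rw [PySem.Dict.get?_insert_of_ne m _ hjt]
        rw [hstepA, hstepB, hcast]
        apply ih
        · refine ⟨hitems, ?_, h3, ?_, ?_⟩
          · have hg' : ∀ j ∈ opens, ((m.insert t (s : Int)).get? j).isNone
                = ((!(j == t)) && (m.get? j).isNone) := by
              intro j hj
              by_cases hjt : j = t
              · subst hjt; simp [PySem.Dict.get?_insert_self]
              · rw [PySem.Dict.get?_insert_of_ne m _ hjt]
                simp [hjt]
            rw [List.filter_congr hg', ← List.filter_filter, ← h2]
            simp only [List.reverse_cons, List.filter_append]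
            have : ∀ x ∈ rest.reverse, (!(x == t)) = true := by
              intro x hx
              simp only [List.mem_reverse] at hx
              have hxt : x ≠ t := fun h => ht_rest (h ▸ hx)
              simp [hxt]
            rw [List.filter_eq_self.mpr this]
            simp
          · intro j hj
            have := h4 j hj; push_cast; omega
          · intro k v hk
            by_cases hkt : k = t
            · subst hkt; exact ht_mem
            · rw [PySem.Dict.get?_insert_of_ne m _ hkt] at hk
              exact h5 k v hk
        · intro n
          have := hBal (n + 1)
          simp [List.take_succ_cons] at this
          omega
      · -- other character: both states unchanged
        have hstepA : getDictStep D (s : Int) c = D := by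
          simp [getDictStep, hc1, hc2]
        have hstepB : stackStep (opens, stack, m) ((s : Int), c) = (opens, stack, m) := by
          simp [stackStep, hc1, hc2]
        rw [hstepA, hstepB, hcast]
        apply ih
        · refine ⟨h1, h2, h3, ?_, h5⟩
          intro j hj
          have := h4 j hj; push_cast; omega
        · intro n
          have := hBal (n + 1)
          simp [List.take_succ_cons, hc1, hc2] at this
          omega

-- the stack run agrees with B's independent per-bracket scans
lemma scanInv : ∀ (rest : List Char) (cs : List Char) (s : Nat) (opens stack : List Int)
    (m : PySem.Dict Int Int),
    cs.drop s = rest →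
    (∀ t ∈ opens, (m.get? t).isNone = true → t ∈ stack) →
    (∀ (k : Nat) (t : Int), stack[k]? = some t →
        closeOf cs t = closeScan (PySem.List.enumerate rest (s : Int)) ((k : Int) + 1)) →
    (∀ t j, m.get? t = some j → closeOf cs t = some j) →
    GDBal stack.length rest →
    (∀ t ∈ ((PySem.List.enumerate rest (s : Int)).foldl stackStep (opens, stack, m)).1,
        ((PySem.List.enumerate rest (s : Int)).foldl stackStep (opens, stack, m)).2.2.get? t
          = closeOf cs t) ∧
    ((PySem.List.enumerate rest (s : Int)).foldl stackStep (opens, stack, m)).1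
      = opens ++ (PySem.List.enumerate rest (s : Int)).filterMap
          (fun p => if p.2 = '[' then some p.1 else none) := by
  intro rest
  induction rest with
  | nil =>
    intro cs s opens stack m _ h1 h2 h3 _
    simp only [PySem.List.enumerate_nil, List.foldl_nil, List.filterMap_nil, List.append_nil]
    refine ⟨?_, by simp⟩
    intro t ht
    cases hmv : m.get? t with
    | some j => exact (h3 t j hmv).symm
    | none =>
      have hts : t ∈ stack := h1 t ht (by simp [hmv])
      obtain ⟨k, hkt⟩ := List.mem_iff_getElem?.mp hts
      have := h2 k t hkt
      simp only [PySem.List.enumerate_nil, closeScan] at this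
      simp [this]
  | cons c rest ih =>
    intro cs s opens stack m hdrop h1 h2 h3 hBal
    have hdrop' : cs.drop (s + 1) = rest := by
      rw [← List.drop_drop, hdrop]
      simp
    have hcast : ((s : Int) + 1) = ((s + 1 : Nat) : Int) := by push_cast; ring
    rw [PySem.List.enumerate_cons]
    simp only [List.foldl_cons, List.filterMap_cons]
    by_cases hc1 : c = '['
    · -- push
      subst hc1
      have hstep : stackStep (opens, stack, m) ((s : Int), '[') =
          (opens ++ [(s : Int)], (s : Int) :: stack, m) := by simp [stackStep]
      rw [hstep, hcast]
      have hrec := ih cs (s + 1) (opens ++ [(s : Int)]) ((s : Int) :: stack) m hdrop'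
        (by
          intro t ht hmt
          rcases List.mem_append.mp ht with h | h
          · exact List.mem_cons_of_mem _ (h1 t h hmt)
          · simp only [List.mem_singleton] at h
            subst h; exact List.mem_cons_self)
        (by
          intro k t hkt
          cases k with
          | zero =>
            simp only [List.getElem?_cons_zero, Option.some.injEq] at hkt
            subst hkt
            unfold closeOf
            rw [show ((s : Int) + 1) = (((s + 1 : Nat) : Int)) from hcast,
              PySem.List.slice_from_natCast, hdrop']
            norm_num
          | succ k =>
            simp only [List.getElem?_cons_succ] at hkt
            have := h2 k t hkt
            rw [this, PySem.List.enumerate_cons]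
            simp only [closeScan]
            split_ifs with hA
            · rw [hcast]
              exact congrArg _ (by push_cast; ring)
            · exact absurd trivial hA)
        h3
        (by
          intro n
          have := hBal (n + 1)
          simp [List.take_succ_cons] at this
          simp only [List.length_cons]
          omega)
      refine ⟨hrec.1, ?_⟩
      rw [hrec.2]
      simp
    · by_cases hc2 : c = ']'
      · -- pop
        subst hc2
        have hne : stack ≠ [] := by
          intro hnil
          have := hBal 1
          simp [hnil] at this
        obtain ⟨t, stk, rfl⟩ : ∃ t stk, stack = t :: stk := by
          cases stack with
          | nil => exact absurd rfl hne
          | cons t stk => exact ⟨t, stk, rfl⟩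
        have hstep : stackStep (opens, t :: stk, m) ((s : Int), ']') =
            (opens, stk, m.insert t (s : Int)) := by simp [stackStep]
        have htop : closeOf cs t = some (s : Int) := by
          have := h2 0 t (by simp)
          rw [this, PySem.List.enumerate_cons]
          simp [closeScan]
        rw [hstep, hcast]
        have hrec := ih cs (s + 1) opens stk (m.insert t (s : Int)) hdrop'
          (by
            intro u hu hmu
            have hut : u ≠ t := by
              intro he
              subst he
              rw [PySem.Dict.get?_insert_self] at hmu
              simp at hmu
            rw [PySem.Dict.get?_insert_of_ne m _ hut] at hmu
            have := h1 u hu hmu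
            rcases List.mem_cons.mp this with h | h
            · exact absurd h hut
            · exact h)
          (by
            intro k u hku
            have := h2 (k + 1) u (by simpa using hku)
            rw [this, PySem.List.enumerate_cons]
            simp only [closeScan]
            split_ifs with hA
            · exfalso; push_cast at hA; omega
            · rw [hcast]
              exact congrArg _ (by push_cast; ring))
          (by
            intro u j hmu
            by_cases hut : u = t
            · subst hut
              rw [PySem.Dict.get?_insert_self] at hmu
              simp only [Option.some.injEq] at hmu
              subst hmu
              exact htop
            · rw [PySem.Dict.get?_insert_of_ne m _ hut] at hmu
              exact h3 u j hmu)
          (by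
            intro n
            have := hBal (n + 1)
            simp [List.take_succ_cons] at this
            omega)
        refine ⟨hrec.1, ?_⟩
        rw [hrec.2]
        rfl
      · -- other character: state unchanged, every scan skips the character
        have hstep : stackStep (opens, stack, m) ((s : Int), c) = (opens, stack, m) := by
          simp [stackStep, hc1, hc2]
        rw [hstep, hcast]
        have hrec := ih cs (s + 1) opens stack m hdrop' h1
          (by
            intro k u hku
            have := h2 k u hku
            rw [this, PySem.List.enumerate_cons]
            simp only [closeScan]
            rw [if_neg hc1, if_neg hc2, hcast])
          h3
          (by
            intro n
            have := hBal (n + 1)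
            simp [List.take_succ_cons, hc1, hc2] at this
            omega)
        refine ⟨hrec.1, ?_⟩
        rw [hrec.2]
        norm_num [hc1]
    
lemma initInv : GDInv PySem.Dict.empty [] [] PySem.Dict.empty ((0 : Nat) : Int) := by
  refine ⟨by simp [PySem.Dict.empty], by simp, by simp, by simp, ?_⟩
  intro k v hk
  rw [PySem.Dict.get?_empty] at hk
  exact absurd hk (by simp)

lemma pre_bal (code : String) (hpre : Pre_get_dict code) : GDBal 0 code.toList := by
  intro n
  by_cases h : n ≤ code.toList.length
  · simpa using hpre n h
  · rw [List.take_of_length_le (by omega)]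
    have := hpre code.toList.length le_rfl
    rw [List.take_length] at this
    omega

-- ===== VERDICT (by name: the statement is the Claim_ definition above) =====
theorem get_dict_spec : Claim_equal_get_dict := by
  intro code _ hpre
  unfold Spec_get_dict get_dict get_dict_alt
  have hbody : (fun (D : PySem.Dict String (Option Int)) (i : Int) =>
      match PySem.Str.pyGet? code i with
      | some c => getDictStep D i c
      | none => D) = (fun D i =>
      match PySem.List.pyGet? code.toList i with
      | some c => getDictStep D i c
      | none => D) := by
    funext D i
    simp [PySem.Str.pyGet?]
  have hlen : PySem.Str.len code = (code.toList.length : Int) := by simp [pysem]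
  rw [hbody, hlen]
  have h0 : ((0 : Nat) : Int) = (0 : Int) := by norm_num
  have hr := rangeA code.toList code.toList.length 0 PySem.Dict.empty (by omega)
  rw [h0, List.drop_zero] at hr
  rw [hr]
  have hm := mainInv code.toList 0 PySem.Dict.empty [] [] PySem.Dict.empty initInv
    (by simpa using pre_bal code hpre)
  rw [h0] at hm
  rw [hm]
  have hs := scanInv code.toList code.toList 0 [] [] PySem.Dict.empty (by simp)
    (by simp)
    (by intro k t hkt; simp at hkt)
    (by intro t j h; rw [PySem.Dict.get?_empty] at h; exact absurd h (by simp))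
    (by simpa using pre_bal code hpre)
  rw [h0] at hs
  obtain ⟨hpt, hlist⟩ := hs
  rw [List.map_congr_left (fun t ht => by rw [hpt t ht])]
  rw [hlist]
  simp only [List.nil_append]
  rw [List.map_filterMap]
  apply List.filterMap_congr
  intro p _
  by_cases h : p.2 = '[' <;> simp [h]
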